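-- pv_equiv track=rewrite | github.com/kotechile/myTrendAnalysis | main.py | _calculate_quality_breakdown
-- ===== SOURCE A (Python) =====
-- from typing import Dict, Any, List, Optional
--
-- def _calculate_quality_breakdown(ideas: List[Dict]) -> Dict[str, int]:
--     """Calculate quality tier breakdown"""
--     breakdown = {
--         "excellent": 0,
--         "high_quality": 0,
--         "good": 0,
--         "decent": 0,
--         "needs_work": 0
--     }
--
--     for idea in ideas:
--         score = idea.get("overall_quality_score", 0)
--         if score >= 85:
--             breakdown["excellent"] += 1
--         elif score >= 75:
--             breakdown["high_quality"] += 1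
--         elif score >= 65:
--             breakdown["good"] += 1
--         elif score >= 55:
--             breakdown["decent"] += 1
--         else:
--             breakdown["needs_work"] += 1
--
--     return breakdown
-- ===== SOURCE B (Python) =====
-- def _calculate_quality_breakdown(ideas):
--     """Calculate quality tier breakdown"""
--     scores = [idea.get("overall_quality_score", 0) for idea in ideas]
--     ge85 = sum(1 for s in scores if s >= 85)
--     ge75 = sum(1 for s in scores if s >= 75)
--     ge65 = sum(1 for s in scores if s >= 65)
--     ge55 = sum(1 for s in scores if s >= 55)
--     return {
--         "excellent": ge85,
--         "high_quality": ge75 - ge85,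
--         "good": ge65 - ge75,
--         "decent": ge55 - ge65,
--         "needs_work": len(scores) - ge55,
--     }
-- ===== Notes on version B (the rewrite author's own statement) =====
-- stated objective: alternative
-- what changed: Instead of classifying each idea into its tier in one pass, B extracts the scores once and computes cumulative threshold-exceedance counts (how many scores are >= each threshold) in separate passes, then derives each tier count as the difference of adjacent cumulative counts.
import Mathlib
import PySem

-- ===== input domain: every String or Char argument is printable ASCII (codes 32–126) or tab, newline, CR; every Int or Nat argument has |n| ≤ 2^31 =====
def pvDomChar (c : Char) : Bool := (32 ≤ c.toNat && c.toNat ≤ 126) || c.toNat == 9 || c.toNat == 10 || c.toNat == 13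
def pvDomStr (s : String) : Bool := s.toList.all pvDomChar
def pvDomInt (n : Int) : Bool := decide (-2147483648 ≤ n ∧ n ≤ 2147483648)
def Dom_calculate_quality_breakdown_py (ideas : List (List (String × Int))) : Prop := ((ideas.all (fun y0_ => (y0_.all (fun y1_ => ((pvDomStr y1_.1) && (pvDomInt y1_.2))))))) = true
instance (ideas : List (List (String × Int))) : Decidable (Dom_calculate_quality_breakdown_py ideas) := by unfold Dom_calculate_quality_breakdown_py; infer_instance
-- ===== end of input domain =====

-- B replaces A's per-idea if/elif classification with staged passes: extract the scores once,
-- count how many reach each threshold, and take differences of adjacent cumulative counts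
-- (objective: alternative).

-- ===== PORT A =====
-- one iteration of A's for-loop (breakdown[k] += 1 ported as Dict.modify; the key is always present)
def cqStepA (d : PySem.Dict String Int) (idea : List (String × Int)) : PySem.Dict String Int :=
  let score := (PySem.Dict.ofList idea).getD "overall_quality_score" 0
  if score ≥ 85 then d.modify "excellent" 0 (· + 1)
  else if score ≥ 75 then d.modify "high_quality" 0 (· + 1)
  else if score ≥ 65 then d.modify "good" 0 (· + 1)
  else if score ≥ 55 then d.modify "decent" 0 (· + 1)
  else d.modify "needs_work" 0 (· + 1)

def calculate_quality_breakdown_py (ideas : List (List (String × Int))) : List (String × Int) :=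
  (ideas.foldl cqStepA
    (PySem.Dict.ofList [("excellent", 0), ("high_quality", 0), ("good", 0), ("decent", 0), ("needs_work", 0)])).items

-- ===== PORT B =====
-- sum(1 for s in scores if s >= t) ported as countP cast to Int
def cqGE (scores : List Int) (t : Int) : Int :=
  (scores.countP (fun s => decide (t ≤ s)) : Nat)

def calculate_quality_breakdown_py_alt (ideas : List (List (String × Int))) : List (String × Int) :=
  let scores := ideas.map (fun idea => (PySem.Dict.ofList idea).getD "overall_quality_score" 0)
  let ge85 := cqGE scores 85
  let ge75 := cqGE scores 75
  let ge65 := cqGE scores 65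
  let ge55 := cqGE scores 55
  [("excellent", ge85), ("high_quality", ge75 - ge85), ("good", ge65 - ge75),
   ("decent", ge55 - ge65), ("needs_work", (scores.length : Int) - ge55)]

-- ===== PRECONDITION & SPEC =====
def Spec_calculate_quality_breakdown_py (ideas : List (List (String × Int))) (out : List (String × Int)) : Prop := out = calculate_quality_breakdown_py_alt ideas
instance (ideas : List (List (String × Int))) (out : List (String × Int)) : Decidable (Spec_calculate_quality_breakdown_py ideas out) := by unfold Spec_calculate_quality_breakdown_py; infer_instance

-- ===== CLAIM (what is proved, stated in full; the proofs are below) =====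
def Claim_equal_calculate_quality_breakdown_py : Prop := ∀ (ideas : List (List (String × Int))), Dom_calculate_quality_breakdown_py ideas → Spec_calculate_quality_breakdown_py ideas (calculate_quality_breakdown_py ideas)

-- ===== LEMMAS AND PROOFS =====

theorem cqGE_cons (s : Int) (scores : List Int) (t : Int) :
    cqGE (s :: scores) t = cqGE scores t + (if t ≤ s then 1 else 0) := by
  unfold cqGE
  rw [List.countP_cons]
  by_cases h : t ≤ s <;> simp [h]

-- invariant: A's fold from arbitrary counters equals B's cumulative-difference formula shifted by those counters
theorem cq_fold_corr (ideas : List (List (String × Int))) (c0 c1 c2 c3 c4 : Int) :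
    (ideas.foldl cqStepA
      (PySem.Dict.mk [("excellent", c4), ("high_quality", c3), ("good", c2), ("decent", c1), ("needs_work", c0)])).items
    = (let scores := ideas.map (fun idea => (PySem.Dict.ofList idea).getD "overall_quality_score" 0)
       [("excellent", c4 + cqGE scores 85),
        ("high_quality", c3 + (cqGE scores 75 - cqGE scores 85)),
        ("good", c2 + (cqGE scores 65 - cqGE scores 75)),
        ("decent", c1 + (cqGE scores 55 - cqGE scores 65)),
        ("needs_work", c0 + ((scores.length : Int) - cqGE scores 55))]) := by
  induction ideas generalizing c0 c1 c2 c3 c4 with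
  | nil => simp [cqGE]
  | cons idea rest ih =>
    simp only [List.foldl_cons, List.map_cons]
    set score := (PySem.Dict.ofList idea).getD "overall_quality_score" 0 with hscore
    by_cases h85 : score ≥ 85
    · have h75 : score ≥ 75 := by omega
      have h65 : score ≥ 65 := by omega
      have h55 : score ≥ 55 := by omega
      have key : cqStepA (PySem.Dict.mk [("excellent", c4), ("high_quality", c3), ("good", c2), ("decent", c1), ("needs_work", c0)]) idea
          = PySem.Dict.mk [("excellent", c4 + 1), ("high_quality", c3), ("good", c2), ("decent", c1), ("needs_work", c0)] := by
        simp only [cqStepA]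
        rw [← hscore, if_pos h85]
        simp [PySem.Dict.modify, PySem.Dict.getD, PySem.Dict.get?, PySem.Dict.insert, PySem.Dict.contains]
      rw [key, ih]
      simp [cqGE_cons, h85, h75, h65, h55]
      omega
    · by_cases h75 : score ≥ 75
      · have h65 : score ≥ 65 := by omega
        have h55 : score ≥ 55 := by omega
        have key : cqStepA (PySem.Dict.mk [("excellent", c4), ("high_quality", c3), ("good", c2), ("decent", c1), ("needs_work", c0)]) idea
            = PySem.Dict.mk [("excellent", c4), ("high_quality", c3 + 1), ("good", c2), ("decent", c1), ("needs_work", c0)] := by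
          simp only [cqStepA]
          rw [← hscore, if_neg h85, if_pos h75]
          simp [PySem.Dict.modify, PySem.Dict.getD, PySem.Dict.get?, PySem.Dict.insert, PySem.Dict.contains]
        rw [key, ih]
        have n85 : ¬ (85 : Int) ≤ score := by omega
        simp [cqGE_cons, n85, h75, h65, h55]
        omega
      · by_cases h65 : score ≥ 65
        · have h55 : score ≥ 55 := by omega
          have key : cqStepA (PySem.Dict.mk [("excellent", c4), ("high_quality", c3), ("good", c2), ("decent", c1), ("needs_work", c0)]) idea
              = PySem.Dict.mk [("excellent", c4), ("high_quality", c3), ("good", c2 + 1), ("decent", c1), ("needs_work", c0)] := by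
            simp only [cqStepA]
            rw [← hscore, if_neg h85, if_neg h75, if_pos h65]
            simp [PySem.Dict.modify, PySem.Dict.getD, PySem.Dict.get?, PySem.Dict.insert, PySem.Dict.contains]
          rw [key, ih]
          have n85 : ¬ (85 : Int) ≤ score := by omega
          have n75 : ¬ (75 : Int) ≤ score := by omega
          simp [cqGE_cons, n85, n75, h65, h55]
          omega
        · by_cases h55 : score ≥ 55
          · have key : cqStepA (PySem.Dict.mk [("excellent", c4), ("high_quality", c3), ("good", c2), ("decent", c1), ("needs_work", c0)]) idea
                = PySem.Dict.mk [("excellent", c4), ("high_quality", c3), ("good", c2), ("decent", c1 + 1), ("needs_work", c0)] := by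
              simp only [cqStepA]
              rw [← hscore, if_neg h85, if_neg h75, if_neg h65, if_pos h55]
              simp [PySem.Dict.modify, PySem.Dict.getD, PySem.Dict.get?, PySem.Dict.insert, PySem.Dict.contains]
            rw [key, ih]
            have n85 : ¬ (85 : Int) ≤ score := by omega
            have n75 : ¬ (75 : Int) ≤ score := by omega
            have n65 : ¬ (65 : Int) ≤ score := by omega
            simp [cqGE_cons, n85, n75, n65, h55]
            omega
          · have key : cqStepA (PySem.Dict.mk [("excellent", c4), ("high_quality", c3), ("good", c2), ("decent", c1), ("needs_work", c0)]) idea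
                = PySem.Dict.mk [("excellent", c4), ("high_quality", c3), ("good", c2), ("decent", c1), ("needs_work", c0 + 1)] := by
              simp only [cqStepA]
              rw [← hscore, if_neg h85, if_neg h75, if_neg h65, if_neg h55]
              simp [PySem.Dict.modify, PySem.Dict.getD, PySem.Dict.get?, PySem.Dict.insert, PySem.Dict.contains]
            rw [key, ih]
            have n85 : ¬ (85 : Int) ≤ score := by omega
            have n75 : ¬ (75 : Int) ≤ score := by omega
            have n65 : ¬ (65 : Int) ≤ score := by omega
            have n55 : ¬ (55 : Int) ≤ score := by omega
            simp [cqGE_cons, n85, n75, n65, n55]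
            omega

-- ===== VERDICT (by name: the statement is the Claim_ definition above) =====
theorem calculate_quality_breakdown_py_spec : Claim_equal_calculate_quality_breakdown_py := by
  intro ideas _
  unfold Spec_calculate_quality_breakdown_py calculate_quality_breakdown_py calculate_quality_breakdown_py_alt
  have h := cq_fold_corr ideas 0 0 0 0 0
  simpa [PySem.Dict.ofList] using h
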